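-- pv_equiv track=rewrite | github.com/ddangwal1909/Leetcode_Solutions | 1385-find-the-distance-value-between-two-arrays/1385-find-the-distance-value-between-two-arrays.py | binarysearchdiff
-- ===== SOURCE A (Python) =====
-- def binarysearchdiff(ele,arr,d):
--     start,end=0,len(arr)
--     while start<end:
--         mid = (start+end)//2
--         if -d<=arr[mid]-ele<=d:
--             return False
--         elif (arr[mid]-ele)>d:
--             end=mid
--         else:
--             start=mid+1
--     return True
-- ===== SOURCE B (Python) =====
-- def binarysearchdiff(ele, arr, d):
--     # Recursive binary search on list slices instead of an index-window loop.
--     if not arr: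
--         return True
--     m = len(arr) // 2
--     diff = arr[m] - ele
--     if -d <= diff <= d:
--         return False
--     if diff > d:
--         return binarysearchdiff(ele, arr[:m], d)
--     return binarysearchdiff(ele, arr[m + 1:], d)
-- ===== Notes on version B (the rewrite author's own statement) =====
-- stated objective: alternative
-- what changed: A's iterative while-loop binary search over an index window [start, end) is replaced by a recursive binary search on list slices (recurse on arr[:m] or arr[m+1:]), which probes exactly the same elements in the same order.
import Mathlib
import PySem

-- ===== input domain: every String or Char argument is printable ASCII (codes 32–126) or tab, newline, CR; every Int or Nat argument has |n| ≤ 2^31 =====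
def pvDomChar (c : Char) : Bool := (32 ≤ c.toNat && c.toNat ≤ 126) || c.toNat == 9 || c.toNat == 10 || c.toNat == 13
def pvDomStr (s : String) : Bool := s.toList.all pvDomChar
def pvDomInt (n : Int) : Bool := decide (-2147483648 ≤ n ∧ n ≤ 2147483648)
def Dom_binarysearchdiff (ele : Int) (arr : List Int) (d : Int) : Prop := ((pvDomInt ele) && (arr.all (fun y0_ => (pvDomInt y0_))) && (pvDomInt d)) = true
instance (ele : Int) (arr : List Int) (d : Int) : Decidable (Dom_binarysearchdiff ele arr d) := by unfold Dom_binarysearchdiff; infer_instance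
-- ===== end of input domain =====

-- B is an alternative decomposition: a recursive binary search on list slices instead of A's
-- iterative index-window loop; same probes, same outputs, similar cost (objective: alternative).

-- ===== PORT A =====
-- A's while loop over the index window [start, end); the 'none' arm of pyGet? is unreachable
-- because 0 ≤ start < end ≤ arr.length keeps mid in range (Python never raises here).
def binLoopA (ele : Int) (arr : List Int) (d : Int) (start e : Int) : Bool :=
  if h : start < e then
    let mid := PySem.Int.floordiv (start + e) 2
    match PySem.List.pyGet? arr mid with
    | none => true
    | some v =>
      if -d ≤ v - ele ∧ v - ele ≤ d then false
      else if v - ele > d then binLoopA ele arr d start mid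
      else binLoopA ele arr d (mid + 1) e
  else true
termination_by (e - start).toNat
decreasing_by
  all_goals
    have hb := PySem.Int.floordiv_two_mid_bounds (lo := start) (hi := e) (le_of_lt h)
    have hlt : PySem.Int.floordiv (start + e) 2 < e := by
      rw [PySem.Int.floordiv_lt_iff_lt_mul (by omega)]; omega
    omega

def binarysearchdiff (ele : Int) (arr : List Int) (d : Int) : Bool :=
  binLoopA ele arr d 0 (arr.length : Int)

-- ===== PORT B =====
-- Source B: recursion on slices; the 'none' arm of pyGet? is unreachable (0 ≤ len//2 < len).
def binarysearchdiff_alt (ele : Int) (arr : List Int) (d : Int) : Bool :=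
  if arr.isEmpty then true
  else
    let m : Int := PySem.Int.floordiv (arr.length : Int) 2
    match PySem.List.pyGet? arr m with
    | none => true
    | some v =>
      let diff := v - ele
      if -d ≤ diff ∧ diff ≤ d then false
      else if diff > d then binarysearchdiff_alt ele (PySem.List.slice arr none (some m)) d
      else binarysearchdiff_alt ele (PySem.List.slice arr (some (m + 1)) none) d
termination_by arr.length
decreasing_by
  · have hne : arr ≠ [] := by simpa [List.isEmpty_iff] using ‹¬ arr.isEmpty = true›
    have hpos : 0 < arr.length := List.length_pos_iff.mpr hne
    have hm : PySem.Int.floordiv ((arr.length : Nat) : Int) 2 = ((arr.length / 2 : Nat) : Int) := by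
      exact_mod_cast PySem.Int.floordiv_natCast arr.length 2
    rw [hm, PySem.List.slice_to_natCast]
    simp only [List.length_take]
    omega
  · have hne : arr ≠ [] := by simpa [List.isEmpty_iff] using ‹¬ arr.isEmpty = true›
    have hpos : 0 < arr.length := List.length_pos_iff.mpr hne
    have hm2 : PySem.Int.floordiv ((arr.length : Nat) : Int) 2 = ((arr.length / 2 : Nat) : Int) := by
      exact_mod_cast PySem.Int.floordiv_natCast arr.length 2
    have hm : PySem.Int.floordiv ((arr.length : Nat) : Int) 2 + 1 = ((arr.length / 2 + 1 : Nat) : Int) := by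
      rw [hm2]; push_cast; ring
    rw [hm, PySem.List.slice_from_natCast]
    simp only [List.length_drop]
    omega

-- ===== PRECONDITION & SPEC =====
def Spec_binarysearchdiff (ele : Int) (arr : List Int) (d : Int) (out : Bool) : Prop := out = binarysearchdiff_alt ele arr d
instance (ele : Int) (arr : List Int) (d : Int) (out : Bool) : Decidable (Spec_binarysearchdiff ele arr d out) := by unfold Spec_binarysearchdiff; infer_instance

-- ===== CLAIM (what is proved, stated in full; the proofs are below) =====
def Claim_equal_binarysearchdiff : Prop := ∀ (ele : Int) (arr : List Int) (d : Int), Dom_binarysearchdiff ele arr d → Spec_binarysearchdiff ele arr d (binarysearchdiff ele arr d)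

-- ===== LEMMAS AND PROOFS =====

-- A's loop on the window [s, e) computes B's recursion on the corresponding sublist.
lemma binLoopA_eq_alt (ele d : Int) (arr : List Int) :
    ∀ (n : Nat) (s e : Int), (e - s).toNat = n → 0 ≤ s → s ≤ e → e ≤ (arr.length : Int) →
      binLoopA ele arr d s e = binarysearchdiff_alt ele ((arr.drop s.toNat).take (e - s).toNat) d := by
  intro n
  induction n using Nat.strong_induction_on with
  | _ n ih =>
  intro s e hn hs hse hle
  set sub := (arr.drop s.toNat).take (e - s).toNat with hsub
  have hsublen : sub.length = (e - s).toNat := by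
    simp only [hsub, List.length_take, List.length_drop]; omega
  rw [binLoopA, binarysearchdiff_alt]
  by_cases h : s < e
  · rw [dif_pos h]
    have hsubne : sub.isEmpty = false := by
      rw [List.isEmpty_eq_false_iff, ← List.length_pos_iff, hsublen]; omega
    rw [hsubne]
    simp only [Bool.false_eq_true, if_false]
    set mid := PySem.Int.floordiv (s + e) 2 with hmid
    have hb := PySem.Int.floordiv_two_mid_bounds (lo := s) (hi := e) (le_of_lt h)
    have hlt : mid < e := by
      rw [hmid, PySem.Int.floordiv_lt_iff_lt_mul (by omega)]; omega
    -- the midpoint, relative to the window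
    set kk : Nat := sub.length / 2 with hkk
    have hkk2 : kk = (e - s).toNat / 2 := by rw [hkk, hsublen]
    have hmid_eq : mid = s + (kk : Int) := by
      rw [hmid, PySem.Int.floordiv_eq_iff_of_pos (by omega)]
      constructor <;> omega
    have hkklt : kk < sub.length := by omega
    have hm : PySem.Int.floordiv ((sub.length : Nat) : Int) 2 = (kk : Int) := by
      rw [hkk]; exact_mod_cast PySem.Int.floordiv_natCast sub.length 2
    rw [hm]
    -- both probes fetch the same element
    have hmidrange : mid < (arr.length : Int) := by omega
    have hgetA : PySem.List.pyGet? arr mid = some (arr[mid.toNat]'(by omega)) :=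
      PySem.List.pyGet?_eq_some_getElem arr (by omega) hmidrange
    have hsubget : sub[kk]'hkklt = arr[mid.toNat]'(by omega) := by
      have h1 : sub[kk]'hkklt = (arr.drop s.toNat)[kk]'(by simp; omega) := by
        simp [hsub]
      rw [h1, List.getElem_drop]
      congr 1
      omega
    have hgetB : PySem.List.pyGet? sub ((kk : Nat) : Int) = some (arr[mid.toNat]'(by omega)) := by
      rw [PySem.List.pyGet?_natCast, List.getElem?_eq_getElem hkklt, hsubget]
    simp only [hgetA, hgetB]
    set v := arr[mid.toNat]'(by omega) with hv
    by_cases hc1 : -d ≤ v - ele ∧ v - ele ≤ d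
    · rw [if_pos hc1, if_pos hc1]
    · rw [if_neg hc1, if_neg hc1]
      by_cases hc2 : v - ele > d
      · rw [if_pos hc2, if_pos hc2]
        -- left half: window [s, mid) vs slice sub[:kk]
        have hrec := ih (mid - s).toNat (by omega) s mid rfl hs (by omega) (by omega)
        have h1 : (mid - s).toNat = min kk (e - s).toNat := by omega
        rw [hrec, PySem.List.slice_to_natCast, hsub, List.take_take, h1]
      · rw [if_neg hc2, if_neg hc2]
        -- right half: window [mid+1, e) vs slice sub[kk+1:]
        have hrec := ih (e - (mid + 1)).toNat (by omega) (mid + 1) e rfl (by omega) (by omega) hle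
        have hcast : (kk : Int) + 1 = ((kk + 1 : Nat) : Int) := by push_cast; ring
        have h2 : (e - (mid + 1)).toNat = (e - s).toNat - (kk + 1) := by omega
        have h3 : (mid + 1).toNat = s.toNat + (kk + 1) := by omega
        rw [hrec, hcast, PySem.List.slice_from_natCast, hsub, List.drop_take, List.drop_drop, h2, h3]
  · rw [dif_neg h]
    have he : e = s := by omega
    have : sub.isEmpty = true := by
      rw [List.isEmpty_iff, ← List.length_eq_zero_iff, hsublen]; omega
    rw [this, if_pos rfl]

theorem binarysearchdiff_spec : Claim_equal_binarysearchdiff := by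
  intro ele arr d _
  unfold Spec_binarysearchdiff binarysearchdiff
  have h := binLoopA_eq_alt ele d arr (arr.length) 0 (arr.length : Int) (by omega) le_rfl (by positivity) le_rfl
  simpa using h
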